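-- pv_equiv track=rewrite | github.com/locked-out/handbook | prerequisite.py | cleanCommas
-- ===== SOURCE A (Python) =====
-- def cleanCommas(tokens):
--     out = ['(']
--     for i, token in enumerate(tokens):
--         if token == ',' and i + 1 < len(tokens) and tokens[i + 1] in ('and', 'or'):
--             out.extend((')', tokens.pop(i + 1), '('))
--         else:
--             out.append(token)
--     out.append(')')
--     return out
-- ===== SOURCE B (Python) =====
-- def cleanCommas(tokens):
--     # Backward scan from the end, emit the output reversed, then
--     # reverse once at the end.  No mutation of tokens (A pops from its argument).
--     rev = [')']
--     j = len(tokens) - 1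
--     while j >= 0:
--         tok = tokens[j]
--         if tok in ('and', 'or') and j > 0 and tokens[j - 1] == ',':
--             rev.extend(('(', tok, ')'))
--             j -= 2
--         else:
--             rev.append(tok)
--             j -= 1
--     rev.append('(')
--     rev.reverse()
--     return rev
-- ===== Notes on version B (the rewrite author's own statement) =====
-- stated objective: alternative
-- what changed: Replaces the forward enumerate loop that rewrites by mutating the list with tokens.pop(i+1) by a backward index scan over an unmutated list that emits the output reversed (skipping two positions per rewrite) and reverses it once at the end.
import Mathlib
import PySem

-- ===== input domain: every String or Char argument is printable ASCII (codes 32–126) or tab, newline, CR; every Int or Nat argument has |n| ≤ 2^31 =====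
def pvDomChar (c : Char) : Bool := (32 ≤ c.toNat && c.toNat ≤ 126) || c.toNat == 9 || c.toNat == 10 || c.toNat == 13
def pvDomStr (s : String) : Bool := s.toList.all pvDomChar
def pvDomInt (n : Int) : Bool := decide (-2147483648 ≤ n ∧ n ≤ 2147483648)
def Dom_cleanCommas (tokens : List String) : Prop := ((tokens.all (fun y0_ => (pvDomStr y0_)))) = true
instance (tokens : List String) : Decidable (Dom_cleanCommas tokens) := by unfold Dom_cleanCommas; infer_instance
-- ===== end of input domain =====

-- B replaces A's forward loop (which rewrites by popping from the list in place) by a backward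
-- scan over an unmutated list that skips instead of popping and reverses the output once at the
-- end; equivalence is about the RETURN value only (A mutates its argument, B does not).

-- ===== PORT A =====
-- A's for-loop over enumerate(tokens) while tokens is popped in place: state = (current
-- list, index i); tokens.pop(i+1) is eraseIdx (the popped value is tokens[i+1], already read).
def cleanALoop (tokens : List String) (i : Nat) (out : List String) : List String :=
  if h : i < tokens.length then
    let token := tokens[i]
    if token = "," ∧ i + 1 < tokens.length ∧
        (tokens.getD (i + 1) "" = "and" ∨ tokens.getD (i + 1) "" = "or") then
      cleanALoop (tokens.eraseIdx (i + 1)) (i + 1) (out ++ [")", tokens.getD (i + 1) "", "("])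
    else
      cleanALoop tokens (i + 1) (out ++ [token])
  else out
termination_by tokens.length - i
decreasing_by
  · have := List.length_eraseIdx_of_lt (l := tokens) (i := i + 1) (by omega)
    omega
  · omega

def cleanCommas (tokens : List String) : List String :=
  cleanALoop tokens 0 ["("] ++ [")"]

-- ===== PORT B =====
-- Source B's while-loop: j counts down; encoded as recursion on j+1 (jp is the current index).
def cleanBLoop (tokens : List String) (j : Nat) (rev : List String) : List String :=
  match j with
  | 0 => rev
  | jp + 1 =>
    let tok := tokens.getD jp ""
    if (tok = "and" ∨ tok = "or") ∧ 0 < jp ∧ tokens.getD (jp - 1) "" = "," then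
      cleanBLoop tokens (jp - 1) (rev ++ ["(", tok, ")"])
    else
      cleanBLoop tokens jp (rev ++ [tok])

def cleanCommas_alt (tokens : List String) : List String :=
  ((cleanBLoop tokens tokens.length [")"]) ++ ["("]).reverse

-- ===== PRECONDITION & SPEC =====
def Spec_cleanCommas (tokens : List String) (out : List String) : Prop := out = cleanCommas_alt tokens
instance (tokens : List String) (out : List String) : Decidable (Spec_cleanCommas tokens out) := by unfold Spec_cleanCommas; infer_instance

-- ===== CLAIM (what is proved, stated in full; the proofs are below) =====
def Claim_equal_cleanCommas : Prop := ∀ (tokens : List String), Dom_cleanCommas tokens → Spec_cleanCommas tokens (cleanCommas tokens)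

-- ===== LEMMAS AND PROOFS =====

-- Reference form: forward greedy rewrite as structural recursion on the token list.
def go : List String → List String
  | [] => []
  | [x] => [x]
  | x :: t :: rest' =>
    if x = "," ∧ (t = "and" ∨ t = "or") then ")" :: t :: "(" :: go rest'
    else x :: go (t :: rest')

theorem drop_eraseIdx_succ (l : List String) (i : Nat) (h : i + 1 < l.length) :
    (l.eraseIdx (i + 1)).drop (i + 1) = l.drop (i + 2) := by
  rw [List.eraseIdx_eq_take_drop_succ]
  rw [List.drop_append_of_le_length (by simp; omega)]
  simp

theorem cleanALoop_eq_go (tokens : List String) (i : Nat) (out : List String) :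
    cleanALoop tokens i out = out ++ go (tokens.drop i) := by
  induction tokens, i, out using cleanALoop.induct with
  | case1 tokens i out h token hcond ih =>
    obtain ⟨htok, hlt, hnext⟩ := hcond
    have htok' : tokens[i] = "," := htok
    have hgd : tokens.getD (i + 1) "" = tokens[i + 1] := List.getD_eq_getElem _ _ hlt
    have ht' : tokens[i + 1] = "and" ∨ tokens[i + 1] = "or" := by rw [← hgd]; exact hnext
    rw [cleanALoop, dif_pos h]
    dsimp only
    rw [if_pos ⟨htok', hlt, hnext⟩, ih, drop_eraseIdx_succ tokens i hlt]
    rw [List.drop_eq_getElem_cons h, List.drop_eq_getElem_cons hlt]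
    simp only [go]
    rw [if_pos ⟨htok', ht'⟩, hgd]
    simp
  | case2 tokens i out h token hcond ih =>
    have hcond' : ¬ (tokens[i] = "," ∧ i + 1 < tokens.length ∧
        (tokens.getD (i + 1) "" = "and" ∨ tokens.getD (i + 1) "" = "or")) := hcond
    simp only [show token = tokens[i] from rfl] at ih
    rw [cleanALoop, dif_pos h]
    dsimp only
    rw [if_neg hcond', ih, List.drop_eq_getElem_cons h]
    by_cases hlt : i + 1 < tokens.length
    · have hgd : tokens.getD (i + 1) "" = tokens[i + 1] := List.getD_eq_getElem _ _ hlt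
      have hc : ¬ (tokens[i] = "," ∧ (tokens[i + 1] = "and" ∨ tokens[i + 1] = "or")) := by
        intro ⟨h1, h2⟩
        exact hcond' ⟨h1, hlt, by rw [hgd]; exact h2⟩
      rw [List.drop_eq_getElem_cons hlt]
      simp only [go]
      rw [if_neg hc]
      simp
    · rw [List.drop_eq_nil_of_le (show tokens.length ≤ i + 1 by omega)]
      simp [go]
  | case3 tokens i out h =>
    rw [cleanALoop, dif_neg h]
    rw [List.drop_eq_nil_of_le (by omega)]
    simp [go]

theorem go_append_single (ys : List String) (x : String)
    (h : ¬ (x = "and" ∨ x = "or") ∨ ys.getLast? ≠ some ",") :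
    go (ys ++ [x]) = go ys ++ [x] := by
  induction ys using go.induct with
  | case1 => simp [go]
  | case2 y =>
    have hy : ¬ (y = "," ∧ (x = "and" ∨ x = "or")) := by
      rcases h with h | h
      · tauto
      · simp at h; tauto
    simp [go, hy]
  | case3 y1 y2 rest hc ih =>
    obtain ⟨h1, h2⟩ := hc
    have ih' := ih (by
      rcases h with h | h
      · exact Or.inl h
      · cases hr : rest.getLast? with
        | none => simp
        | some v =>
          right
          intro hv
          apply h
          rw [hv] at hr
          cases rest with
          | nil => simp at hr
          | cons a as =>
            rw [List.getLast?_cons_cons]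
            rw [← hr]
            rfl)
    simp only [List.cons_append, go]
    rw [if_pos ⟨h1, h2⟩, if_pos ⟨h1, h2⟩, ih']
    simp
  | case4 y1 y2 rest hc ih =>
    have ih' := ih (by
      rcases h with h | h
      · exact Or.inl h
      · right
        rw [List.getLast?_cons_cons] at h
        exact h)
    simp only [List.cons_append, go]
    rw [if_neg hc, if_neg hc]
    simp only [List.cons_append] at ih'
    rw [ih']
    simp

theorem go_append_pair (ys : List String) (t : String) (ht : t = "and" ∨ t = "or") :
    go (ys ++ [",", t]) = go ys ++ [")", t, "("] := by
  induction ys using go.induct with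
  | case1 => simp [go, ht]
  | case2 y =>
    have hy : ¬ (y = "," ∧ (("," : String) = "and" ∨ ("," : String) = "or")) := by simp
    simp [go, ht]
  | case3 y1 y2 rest hc ih =>
    simp only [List.cons_append, go]
    rw [if_pos hc, if_pos hc, ih]
    simp
  | case4 y1 y2 rest hc ih =>
    simp only [List.cons_append, go]
    rw [if_neg hc, if_neg hc]
    simp only [List.cons_append] at ih
    rw [ih]
    simp

theorem cleanBLoop_eq_go (tokens : List String) (j : Nat) (rev : List String)
    (hj : j ≤ tokens.length) :
    cleanBLoop tokens j rev = rev ++ (go (tokens.take j)).reverse := by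
  induction j using Nat.strong_induction_on generalizing rev with
  | _ j ih =>
    match j with
    | 0 => simp [cleanBLoop, go]
    | jp + 1 =>
      have hjp : jp < tokens.length := by omega
      have hgd : tokens.getD jp "" = tokens[jp] := List.getD_eq_getElem _ _ hjp
      have htake : tokens.take (jp + 1) = tokens.take jp ++ [tokens[jp]] := by
        rw [List.take_succ]
        simp [List.getElem?_eq_getElem hjp]
      rw [cleanBLoop]
      by_cases hcond : (tokens.getD jp "" = "and" ∨ tokens.getD jp "" = "or") ∧ 0 < jp ∧
          tokens.getD (jp - 1) "" = ","
      · obtain ⟨ht, hpos, hcomma⟩ := hcond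
        have hjm : jp - 1 < tokens.length := by omega
        have hgd2 : tokens.getD (jp - 1) "" = tokens[jp - 1] := List.getD_eq_getElem _ _ hjm
        have hc2 : tokens[jp - 1] = "," := by rw [← hgd2]; exact hcomma
        have htake2 : tokens.take jp = tokens.take (jp - 1) ++ [tokens[jp - 1]] := by
          conv_lhs => rw [show jp = (jp - 1) + 1 by omega]
          rw [List.take_succ]
          simp [List.getElem?_eq_getElem hjm]
        rw [if_pos ⟨ht, hpos, hcomma⟩]
        rw [ih (jp - 1) (by omega) _ (by omega)]
        rw [htake, htake2, hc2]
        simp only [List.append_assoc, List.singleton_append]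
        rw [go_append_pair _ _ (by rw [← hgd]; exact ht)]
        simp [List.getElem?_eq_getElem hjp]
      · rw [if_neg hcond]
        rw [ih jp (by omega) _ (by omega)]
        rw [htake]
        rw [go_append_single]
        · simp [List.getElem?_eq_getElem hjp]
        · by_cases ht : tokens.getD jp "" = "and" ∨ tokens.getD jp "" = "or"
          · by_cases hpos : 0 < jp
            · right
              have hjm : jp - 1 < tokens.length := by omega
              have hgd2 : tokens.getD (jp - 1) "" = tokens[jp - 1] := List.getD_eq_getElem _ _ hjm
              have htake2 : tokens.take jp = tokens.take (jp - 1) ++ [tokens[jp - 1]] := by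
                conv_lhs => rw [show jp = (jp - 1) + 1 by omega]
                rw [List.take_succ]
                simp [List.getElem?_eq_getElem hjm]
              rw [htake2, List.getLast?_concat]
              intro hcomma
              simp only [Option.some.injEq] at hcomma
              exact hcond ⟨ht, hpos, by rw [hgd2, hcomma]⟩
            · right
              have hz : jp = 0 := by omega
              simp [hz]
          · left
            rw [hgd] at ht
            exact ht

-- ===== VERDICT (by name: the statement is the Claim_ definition above) =====
theorem cleanCommas_spec : Claim_equal_cleanCommas := by
  intro tokens _
  unfold Spec_cleanCommas cleanCommas cleanCommas_alt
  rw [cleanALoop_eq_go, cleanBLoop_eq_go tokens tokens.length [")"] le_rfl]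
  simp
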